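-- pv_equiv track=rewrite | github.com/Wonyoungpark/TIL | Python/Programmers/문자열나누기.py | solution
-- ===== SOURCE A (Python) =====
-- def solution(s):
--     answer = 0
--     same = 0
--     diff = 0
--
--     for i in range(len(s)):
--         if same==diff:
--             answer+=1
--             x = s[i]
--             same,diff = 0,0
--         if s[i]==x: same+=1
--         else: diff+=1
--
--     return answer
-- ===== SOURCE B (Python) =====
-- def solution(s):
--     count = 0
--     start = 0
--     while start < len(s):
--         x = s[start]
--         # materialise the +1/-1 prefix-balance list of the segment headed by x:
--         # the segment ends exactly where the balance first returns to 0 (or at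
--         # the end of the string), so the segment IS this list.
--         bal = []
--         b = 0
--         for j in range(start, len(s)):
--             b += 1 if s[j] == x else -1
--             bal.append(b)
--             if b == 0:
--                 break
--         start += len(bal)
--         count += 1
--     return count
-- ===== Notes on version B (the rewrite author's own statement) =====
-- stated objective: alternative
-- what changed: Replaces A's single fold over same/diff counters (reset in the middle of the loop when they tie) by a staged segment extraction: an outer loop peels one segment per iteration by materialising its +1/-1 prefix-balance list against the segment head, the segment ends where the balance first returns to zero, and the string is advanced by that list's length while segments are counted.
import Mathlib
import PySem

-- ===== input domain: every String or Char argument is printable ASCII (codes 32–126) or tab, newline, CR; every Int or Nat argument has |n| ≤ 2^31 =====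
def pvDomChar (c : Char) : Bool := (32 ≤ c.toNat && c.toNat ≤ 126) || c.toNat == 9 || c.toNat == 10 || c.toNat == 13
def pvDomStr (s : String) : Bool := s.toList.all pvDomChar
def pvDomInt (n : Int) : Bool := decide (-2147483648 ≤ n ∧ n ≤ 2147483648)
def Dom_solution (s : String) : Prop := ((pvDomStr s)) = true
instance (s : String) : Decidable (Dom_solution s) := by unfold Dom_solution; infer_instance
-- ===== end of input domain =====

-- B replaces A's one-pass same/diff counter fold by a staged segment extraction:
-- per segment, a ±1 prefix-balance list is built, the string is cut at the first zero
-- (found by list.index), and the slices are counted (objective: alternative decomposition).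

-- ===== PORT A =====
-- A's loop body over each character; x is carried in the state (Python leaves it
-- uninitialized, but it is always assigned before use since same=diff=0 initially;
-- the initial ' ' is never read).
def stepA (st : Int × Int × Int × Char) (c : Char) : Int × Int × Int × Char :=
  let st2 := if st.2.1 = st.2.2.1 then (st.1 + 1, (0 : Int), (0 : Int), c) else st
  if c = st2.2.2.2 then (st2.1, st2.2.1 + 1, st2.2.2.1, st2.2.2.2)
  else (st2.1, st2.2.1, st2.2.2.1 + 1, st2.2.2.2)

def solution (s : String) : Int :=
  (s.toList.foldl stepA (0, 0, 0, ' ')).1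

-- ===== PORT B =====
-- the inner for loop of Source B: the +1/-1 prefix-balance list of the segment of l headed
-- by x (running balance b); stops right after the balance first returns to 0
def segBal (x : Char) (b : Int) : List Char → List Int
  | [] => []
  | c :: r =>
      if b + (if c = x then 1 else -1) = 0 then [b + (if c = x then 1 else -1)]
      else (b + (if c = x then 1 else -1)) :: segBal x (b + (if c = x then 1 else -1)) r

-- the outer while loop of Source B: one segment peeled per iteration, advance by the
-- balance list's length (the range(start, len(s)) scan = recursion on the remainder)
def outerB : List Char → Int
  | [] => 0
  | c :: rest => outerB ((c :: rest).drop (segBal c 0 (c :: rest)).length) + 1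
termination_by l => l.length
decreasing_by
  simp only [List.length_drop, List.length_cons]
  have : 1 ≤ (segBal c 0 (c :: rest)).length := by
    simp only [segBal]; split <;> simp
  omega

def solution_alt (s : String) : Int := outerB s.toList

-- ===== PRECONDITION & SPEC =====
def Spec_solution (s : String) (out : Int) : Prop := out = solution_alt s
instance (s : String) (out : Int) : Decidable (Spec_solution s out) := by unfold Spec_solution; infer_instance

-- ===== CLAIM (what is proved, stated in full; the proofs are below) =====
def Claim_equal_solution : Prop := ∀ (s : String), Dom_solution s → Spec_solution s (solution s)

-- ===== LEMMAS AND PROOFS =====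

-- proof-side characterisation of "drop the balance list's length": the rest of the list
-- after the first position where the running balance hits 0 (everything consumed if never)
def segRest (x : Char) (b : Int) : List Char → List Char
  | [] => []
  | c :: r =>
      if b + (if c = x then 1 else -1) = 0 then r
      else segRest x (b + (if c = x then 1 else -1)) r

theorem drop_segBal (x : Char) : ∀ (l : List Char) (b : Int),
    l.drop (segBal x b l).length = segRest x b l := by
  intro l
  induction l with
  | nil => intro b; simp [segBal, segRest]
  | cons c r ih =>
      intro b
      by_cases h0 : b + (if c = x then 1 else -1) = 0
      · simp [segBal, segRest, h0]
      · simp only [segBal, segRest, if_neg h0, List.length_cons, List.drop_succ_cons]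
        exact ih _

theorem outerB_cons (c : Char) (rest : List Char) :
    outerB (c :: rest) = outerB (segRest c 1 rest) + 1 := by
  rw [outerB]
  have h1 : segBal c 0 (c :: rest) = (1 : Int) :: segBal c 1 rest := by
    cases rest <;> simp [segBal]
  rw [h1]
  simp only [List.length_cons, List.drop_succ_cons]
  rw [drop_segBal c rest 1]

theorem stepA_bal (a s : Int) (x c : Char) :
    stepA (a, s, s, x) c = (a + 1, 1, 0, c) := by
  simp [stepA]

theorem stepA_mid (a same diff : Int) (x : Char) (h : same ≠ diff) (c : Char) :
    stepA (a, same, diff, x) c =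
      if c = x then (a, same + 1, diff, x) else (a, same, diff + 1, x) := by
  simp [stepA, h]

-- main invariant: A's fold and B's segment recursion, balanced and mid-segment forms together
theorem mainAux : ∀ (n : Nat) (l : List Char), l.length ≤ n →
    (∀ (a s : Int) (x : Char), (List.foldl stepA (a, s, s, x) l).1 = a + outerB l)
    ∧ (∀ (a same diff : Int) (x : Char), same ≠ diff →
        (List.foldl stepA (a, same, diff, x) l).1 = a + outerB (segRest x (same - diff) l)) := by
  intro n
  induction n with
  | zero =>
      intro l hl
      have : l = [] := List.eq_nil_of_length_eq_zero (Nat.le_zero.mp hl)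
      subst this
      constructor
      · intro a s x; simp [outerB]
      · intro a same diff x h; simp [segRest, outerB]
  | succ n ih =>
      intro l hl
      cases l with
      | nil =>
          constructor
          · intro a s x; simp [outerB]
          · intro a same diff x h; simp [segRest, outerB]
      | cons c rest =>
          have hr : rest.length ≤ n := Nat.lt_succ_iff.mp (by simpa using hl)
          constructor
          · intro a s x
            rw [List.foldl_cons, stepA_bal]
            have h10 : (1 : Int) ≠ 0 := one_ne_zero
            have := (ih rest hr).2 (a + 1) 1 0 c h10
            simp only [sub_zero] at this
            rw [this, outerB_cons]
            ring
          · intro a same diff x h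
            rw [List.foldl_cons, stepA_mid a same diff x h c]
            by_cases hcx : c = x
            · simp only [if_pos hcx]
              by_cases hb : same + 1 = diff
              · have hseg : segRest x (same - diff) (c :: rest) = rest := by
                  simp [segRest, hcx]; omega
                rw [hseg, ← hb]
                exact (ih rest hr).1 a (same + 1) x
              · have hseg : segRest x (same - diff) (c :: rest)
                    = segRest x (same + 1 - diff) rest := by
                  simp only [segRest, if_pos hcx]
                  rw [if_neg (by omega)]
                  congr 1; omega
                rw [hseg]
                exact (ih rest hr).2 a (same + 1) diff x hb
            · simp only [if_neg hcx]
              by_cases hb : same = diff + 1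
              · have hseg : segRest x (same - diff) (c :: rest) = rest := by
                  simp [segRest, hcx]; omega
                rw [hseg, hb]
                exact (ih rest hr).1 a (diff + 1) x
              · have hseg : segRest x (same - diff) (c :: rest)
                    = segRest x (same - (diff + 1)) rest := by
                  simp only [segRest, if_neg hcx]
                  rw [if_neg (by omega)]
                  congr 1; omega
                rw [hseg]
                exact (ih rest hr).2 a same (diff + 1) x hb

-- ===== VERDICT (by name: the statement is the Claim_ definition above) =====
theorem solution_spec : Claim_equal_solution := by
  intro s _
  unfold Spec_solution solution solution_alt
  have := (mainAux s.toList.length s.toList le_rfl).1 0 0 ' '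
  simpa using this
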